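-- pv_equiv track=rewrite | github.com/Motigolda/private_vimeo | private_vimeo_downloader.py | validate_save_path
-- ===== SOURCE A (Python) =====
-- def validate_save_path(save_path):
--     if type(save_path) != str:
--         return False
--
--     save_path = save_path.lower()
--
--     if not save_path.endswith("mp4"):
--         return False
--     if save_path.find("/") != -1:
--         save_path = [x for x in save_path.split("/") if x == ""]
--     else:
--         save_path = [x for x in save_path.split("\\") if x == ""]
--
--     if len(save_path) != 0:
--         return False
--
--     return True
-- ===== SOURCE B (Python) =====
-- def validate_save_path(save_path):
--     if type(save_path) != str:
--         return False
--     p = save_path.lower()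
--     if not p.endswith("mp4"):
--         return False
--     sep = "/" if "/" in p else "\\"
--     return not (p.startswith(sep) or p.endswith(sep) or sep * 2 in p)
-- ===== Notes on version B (the rewrite author's own statement) =====
-- stated objective: simpler
-- what changed: Replaces splitting the path into segments and collecting the empty ones with three direct substring tests (leading separator, trailing separator, doubled separator) on the same separator A selects, eliminating the list construction entirely.
import Mathlib
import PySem

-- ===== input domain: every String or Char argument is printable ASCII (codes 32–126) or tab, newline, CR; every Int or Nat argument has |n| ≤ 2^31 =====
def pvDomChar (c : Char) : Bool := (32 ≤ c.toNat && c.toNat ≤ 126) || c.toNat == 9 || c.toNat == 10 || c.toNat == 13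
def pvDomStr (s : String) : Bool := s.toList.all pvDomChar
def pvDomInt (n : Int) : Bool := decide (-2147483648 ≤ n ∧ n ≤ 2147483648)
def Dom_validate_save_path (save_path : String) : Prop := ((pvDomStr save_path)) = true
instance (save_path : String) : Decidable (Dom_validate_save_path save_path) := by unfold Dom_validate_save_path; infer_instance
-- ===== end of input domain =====

-- B replaces A's split-and-collect-empty-segments pass by three direct substring tests
-- (leading / trailing / doubled separator) on the same separator A selects: simpler, no list built.

-- ===== PORT A =====
def validate_save_path (save_path : String) : Bool :=
  -- type(save_path) != str is always false for a String argument
  let s := PySem.Chars.lower save_path.toList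
  if !(PySem.Chars.endswith s ['m', 'p', '4']) then false
  else
    let segs :=
      if PySem.Chars.find s ['/'] != -1 then
        (PySem.Chars.splitOn s ['/']).filter (fun x => x == ([] : List Char))
      else
        (PySem.Chars.splitOn s ['\\']).filter (fun x => x == ([] : List Char))
    if segs.length != 0 then false else true

-- ===== PORT B =====
def validate_save_path_alt (save_path : String) : Bool :=
  let p := PySem.Chars.lower save_path.toList
  if !(PySem.Chars.endswith p ['m', 'p', '4']) then false
  else
    let sep := if PySem.Chars.isIn ['/'] p then ['/'] else ['\\']
    !(PySem.Chars.startswith p sep || PySem.Chars.endswith p sep || PySem.Chars.isIn (sep ++ sep) p)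

-- ===== PRECONDITION & SPEC =====
def Spec_validate_save_path (save_path : String) (out : Bool) : Prop := out = validate_save_path_alt save_path
instance (save_path : String) (out : Bool) : Decidable (Spec_validate_save_path save_path out) := by unfold Spec_validate_save_path; infer_instance

-- ===== CLAIM (what is proved, stated in full; the proofs are below) =====
def Claim_equal_validate_save_path : Prop := ∀ (save_path : String), Dom_validate_save_path save_path → Spec_validate_save_path save_path (validate_save_path save_path)

-- ===== LEMMAS AND PROOFS =====

-- reference single-character splitter used to reason about PySem.Chars.splitOn:
-- mySplit c cur l = the segments of (cur.reverse ++ l) split on c, cur being the reversed current segment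
def mySplit (c : Char) : List Char → List Char → List (List Char)
  | cur, [] => [cur.reverse]
  | cur, x :: xs => if x = c then cur.reverse :: mySplit c [] xs else mySplit c (x :: cur) xs

theorem go_eq (c : Char) : ∀ (fuel : Nat) (l cur : List Char) (acc : List (List Char)),
    l.length ≤ fuel →
    PySem.Chars.splitOn.go [c] fuel l cur acc = acc.reverse ++ mySplit c cur l := by
  intro fuel
  induction fuel with
  | zero =>
    intro l cur acc h
    have : l = [] := by simpa using List.eq_nil_of_length_eq_zero (Nat.le_zero.mp h)
    subst this
    simp [PySem.Chars.splitOn.go, mySplit]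
  | succ n ih =>
    intro l cur acc h
    cases l with
    | nil => simp [PySem.Chars.splitOn.go, mySplit]
    | cons x xs =>
      rw [PySem.Chars.splitOn.go]
      by_cases hx : c = x
      · subst hx
        simp only [List.isPrefixOf, BEq.rfl, Bool.and_eq_true, List.length_singleton,
          List.drop_succ_cons, List.drop_zero]
        rw [ih xs [] _ (by simpa using Nat.le_of_succ_le_succ h)]
        simp [mySplit]
      · have hpre : ([c].isPrefixOf (x :: xs)) = false := by
          simp [List.isPrefixOf, hx]
        rw [hpre]
        simp only [Bool.false_eq_true, not_false_iff, if_neg]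
        rw [ih xs (x :: cur) acc (by simpa using Nat.le_of_succ_le_succ h)]
        simp [mySplit, Ne.symm hx]

theorem splitOn_eq_mySplit (c : Char) (l : List Char) :
    PySem.Chars.splitOn l [c] = mySplit c [] l := by
  simpa using go_eq c (l.length + 1) l [] [] (Nat.le_succ _)

-- empty-segment membership, characterised by substring facts
theorem mem_mySplit (c : Char) : ∀ (l cur : List Char),
    ([] ∈ mySplit c cur l) ↔
      ((cur = [] ∧ (l = [] ∨ [c] <+: l)) ∨ ([c] <:+ l ∨ [c, c] <:+: l)) := by
  intro l
  induction l with
  | nil =>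
    intro cur
    simp [mySplit, eq_comm (a := ([] : List Char))]
  | cons x xs ih =>
    intro cur
    by_cases hx : x = c
    · subst hx
      rw [show mySplit x cur (x :: xs) = cur.reverse :: mySplit x [] xs from by
        simp [mySplit]]
      simp only [List.mem_cons, ih, List.suffix_cons_iff, List.infix_cons_iff,
        List.cons_prefix_cons]
      simp only [eq_comm (a := ([] : List Char)), List.reverse_eq_nil_iff,
        List.cons.injEq, List.nil_prefix, true_and, and_true,
        List.cons_ne_nil, false_or]
      tauto
    · rw [show mySplit c cur (x :: xs) = mySplit c (x :: cur) xs from by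
        simp [mySplit, hx]]
      have hcx : ¬ c = x := fun h => hx h.symm
      simp only [ih, List.suffix_cons_iff, List.infix_cons_iff, List.cons_prefix_cons]
      simp [hcx, List.cons.injEq]

-- no empty segment collected by A  ↔  B's three substring tests all fail
theorem filter_empty_iff (c : Char) (l : List Char) (hl : l ≠ []) :
    ((PySem.Chars.splitOn l [c]).filter (fun x => x == ([] : List Char)) = [] ↔
      ¬([c] <+: l ∨ [c] <:+ l ∨ [c, c] <:+: l)) := by
  rw [splitOn_eq_mySplit, List.filter_eq_nil_iff]
  constructor
  · intro h hcontra
    have hm : [] ∈ mySplit c [] l := by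
      rw [mem_mySplit]
      rcases hcontra with h1 | h2 | h3
      · exact Or.inl ⟨rfl, Or.inr h1⟩
      · exact Or.inr (Or.inl h2)
      · exact Or.inr (Or.inr h3)
    simpa using h [] hm
  · intro h x hx hbeq
    have hxe : x = [] := by simpa using hbeq
    subst hxe
    rcases (mem_mySplit c l []).mp hx with ⟨-, (rfl | hp)⟩ | (hs | hi)
    · exact hl rfl
    · exact h (Or.inl hp)
    · exact h (Or.inr (Or.inl hs))
    · exact h (Or.inr (Or.inr hi))

-- the core equality for a fixed separator character, used for both branches
theorem key_sep (c : Char) (l : List Char) (hne : l ≠ []) :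
    (if (((PySem.Chars.splitOn l [c]).filter (fun x => x == ([] : List Char))).length != 0) = true
      then false else true)
      = !(PySem.Chars.startswith l [c] || PySem.Chars.endswith l [c] ||
          PySem.Chars.isIn ([c] ++ [c]) l) := by
  rw [show ([c] ++ [c] : List Char) = [c, c] from rfl]
  rcases Bool.eq_false_or_eq_true (PySem.Chars.startswith l [c] ||
      PySem.Chars.endswith l [c] || PySem.Chars.isIn [c, c] l) with hb | hb
  · have hb' : [c] <+: l ∨ [c] <:+ l ∨ [c, c] <:+: l := by
      simp only [Bool.or_eq_true] at hb
      rcases hb with (h | h) | h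
      · exact Or.inl ((PySem.Chars.startswith_iff _ _).mp h)
      · exact Or.inr (Or.inl ((PySem.Chars.endswith_iff _ _).mp h))
      · exact Or.inr (Or.inr ((PySem.Chars.isIn_iff_infix _ _).mp h))
    have hfil : ((PySem.Chars.splitOn l [c]).filter (fun x => x == ([] : List Char))) ≠ [] :=
      fun hq => absurd hb' ((filter_empty_iff c l hne).mp hq)
    have hlen : ((PySem.Chars.splitOn l [c]).filter (fun x => x == ([] : List Char))).length ≠ 0 := by
      simpa [List.length_eq_zero_iff] using hfil
    have hcond : (((PySem.Chars.splitOn l [c]).filter (fun x => x == ([] : List Char))).length != 0) = true := by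
      simpa [bne_iff_ne] using hlen
    rw [hcond, hb]
    simp
  · have hnb : ¬([c] <+: l ∨ [c] <:+ l ∨ [c, c] <:+: l) := by
      simp only [Bool.or_eq_false_iff] at hb
      rintro (h | h | h)
      · exact absurd ((PySem.Chars.startswith_iff _ _).mpr h) (by simp [hb.1.1])
      · exact absurd ((PySem.Chars.endswith_iff _ _).mpr h) (by simp [hb.1.2])
      · exact absurd ((PySem.Chars.isIn_iff_infix _ _).mpr h) (by simp [hb.2])
    rw [(filter_empty_iff c l hne).mpr hnb]
    simp [hb]

-- ===== VERDICT (by name: the statement is the Claim_ definition above) =====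
theorem validate_save_path_spec : Claim_equal_validate_save_path := by
  intro save_path _
  unfold Spec_validate_save_path validate_save_path validate_save_path_alt
  set l := PySem.Chars.lower save_path.toList with hl
  by_cases hend : PySem.Chars.endswith l ['m', 'p', '4'] = true
  swap
  · simp [hend]
  · have hne : l ≠ [] := by
      intro h
      rw [h] at hend
      simp [PySem.Chars.endswith_iff, List.suffix_nil] at hend
    have hsel : (PySem.Chars.find l ['/'] != -1) = PySem.Chars.isIn ['/'] l := by
      by_cases hin : PySem.Chars.isIn ['/'] l = true
      · simp [hin, bne_iff_ne, PySem.Chars.find_ne_neg_one_iff,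
          (PySem.Chars.isIn_iff_infix _ _).mp hin]
      · have := (PySem.Chars.isIn_eq_false_iff ['/'] l).mp (by simpa using hin)
        simp only [eq_false_of_ne_true hin, bne_eq_false_iff_eq]
        rw [← PySem.Chars.find_eq_neg_one_iff] at this
        simp [this]
    simp only [hend, Bool.not_true, Bool.false_eq_true, if_false, hsel]
    by_cases hin : PySem.Chars.isIn ['/'] l = true
    · rw [hin]
      simp only [if_true]
      exact key_sep '/' l hne
    · rw [eq_false_of_ne_true hin]
      simp only [Bool.false_eq_true, if_false]
      exact key_sep '\\' l hne
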